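-- pv_equiv track=rewrite | github.com/AlexandruSte/100Challenge | Paduraru Dana/13_sum_of_parts.py | sum_of_parts
-- ===== SOURCE A (Python) =====
-- def sum_of_parts(ls):
--     if not ls:
--         return [0]
--     sums = [0]
--     current_sum = 0
--     for i in range(len(ls) - 1, -1, -1):
--         current_sum += ls[i]
--         sums.append(current_sum)
--     return sorted(sums, reverse=True)
-- ===== SOURCE B (Python) =====
-- def sum_of_parts(ls):
--     return sorted((sum(ls[i:]) for i in range(len(ls) + 1)), reverse=True)
-- ===== Notes on version B (the rewrite author's own statement) =====
-- stated objective: simpler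
-- what changed: Replaces the backward running-total loop and the empty-list guard by a one-line comprehension that recomputes each suffix sum ls[i:] independently (i = len(ls) gives the 0), then sorts descending.
import Mathlib
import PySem

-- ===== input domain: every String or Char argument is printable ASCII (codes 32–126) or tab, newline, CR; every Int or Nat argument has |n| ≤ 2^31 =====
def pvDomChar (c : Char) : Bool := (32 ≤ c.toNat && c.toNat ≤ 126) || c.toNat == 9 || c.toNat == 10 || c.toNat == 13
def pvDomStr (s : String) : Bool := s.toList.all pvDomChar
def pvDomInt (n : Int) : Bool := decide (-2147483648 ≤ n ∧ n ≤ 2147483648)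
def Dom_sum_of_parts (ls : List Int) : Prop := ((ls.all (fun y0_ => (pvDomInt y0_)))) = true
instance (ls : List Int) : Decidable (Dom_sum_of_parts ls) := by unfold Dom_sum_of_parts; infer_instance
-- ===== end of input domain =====

-- B replaces A's backward running-total loop (and its empty-list guard) by independently
-- recomputed suffix sums sum(ls[i:]) for i = 0..len(ls), sorted descending: simpler decomposition.

-- ===== PORT A =====
def sum_of_parts (ls : List Int) : List Int :=
  if ls = [] then [0]
  else
    let st := (PySem.List.pyRange ((ls.length : Int) - 1) (-1) (-1)).foldl
      (fun (st : List Int × Int) i =>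
        let c := st.2 + PySem.List.pyGetD ls i 0   -- index always in range here
        (st.1 ++ [c], c)) ([0], 0)
    PySem.List.sorted st.1 (fun x => x) true

-- ===== PORT B =====
def sum_of_parts_alt (ls : List Int) : List Int :=
  PySem.List.sorted
    ((PySem.List.pyRange 0 ((ls.length : Int) + 1) 1).map
      (fun i => (PySem.List.slice ls (some i) none).sum))
    (fun x => x) true

-- ===== PRECONDITION & SPEC =====
def Spec_sum_of_parts (ls : List Int) (out : List Int) : Prop := out = sum_of_parts_alt ls
instance (ls : List Int) (out : List Int) : Decidable (Spec_sum_of_parts ls out) := by unfold Spec_sum_of_parts; infer_instance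

-- ===== CLAIM (what is proved, stated in full; the proofs are below) =====
def Claim_equal_sum_of_parts : Prop := ∀ (ls : List Int), Dom_sum_of_parts ls → Spec_sum_of_parts ls (sum_of_parts ls)

-- ===== LEMMAS AND PROOFS =====

-- sorted(·, reverse=True) with the identity key depends only on the multiset of an Int list
theorem pv_sorted_rev_congr (xs ys : List Int) (h : xs.Perm ys) :
    PySem.List.sorted xs (fun x => x) true = PySem.List.sorted ys (fun x => x) true := by
  refine List.eq_of_perm_of_sorted (le := fun a b => b ≤ a)
    (fun a b _ _ h1 h2 => le_antisymm h2 h1) ?_ ?_ ?_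
  · exact PySem.List.sorted_pairwise_rev xs (fun x => x)
  · exact PySem.List.sorted_pairwise_rev ys (fun x => x)
  · exact ((PySem.List.sorted_perm xs _ true).trans h).trans
      (PySem.List.sorted_perm ys _ true).symm

-- invariant of A's backward loop: state after the whole descending range
theorem pv_foldA (ls : List Int) : ∀ (m : Nat), m ≤ ls.length → ∀ (acc : List Int) (c : Int),
    (PySem.List.pyRange ((m : Int) - 1) (-1) (-1)).foldl
      (fun (st : List Int × Int) i =>
        let cc := st.2 + PySem.List.pyGetD ls i 0
        (st.1 ++ [cc], cc)) (acc, c)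
    = (acc ++ (List.range m).reverse.map (fun j => c + ((ls.take m).drop j).sum),
       c + (ls.take m).sum) := by
  intro m
  induction m with
  | zero =>
    intro _ acc c
    simp [show PySem.List.pyRange (-1 : Int) (-1) (-1) = [] from rfl]
  | succ m ih =>
    intro hm acc c
    have hlt : m < ls.length := by omega
    have hrange : PySem.List.pyRange (((m : Nat) + 1 : Int) - 1) (-1) (-1)
        = (m : Int) :: PySem.List.pyRange ((m : Int) - 1) (-1) (-1) := by
      have := PySem.List.pyRange_neg_one_cons (a := (m : Int)) (b := -1) (by omega)
      simpa using this
    have hget : PySem.List.pyGetD ls ((m : Nat) : Int) 0 = ls[m] := by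
      rw [PySem.List.pyGetD_natCast]
      exact List.getD_eq_getElem ls 0 hlt
    have htake : ls.take (m + 1) = ls.take m ++ [ls[m]] := by
      rw [List.take_add_one]
      simp [List.getElem?_eq_getElem hlt]
    push_cast
    rw [hrange, List.foldl_cons]
    simp only [hget]
    rw [ih (by omega) (acc ++ [c + ls[m]]) (c + ls[m])]
    simp only [Prod.mk.injEq]
    refine ⟨?_, ?_⟩
    · rw [htake]
      have hrev : (List.range (m + 1)).reverse = m :: (List.range m).reverse := by
        rw [List.range_succ]; simp
      rw [hrev, List.map_cons]
      have hhead : c + ((ls.take m ++ [ls[m]]).drop m).sum = c + ls[m] := by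
        rw [List.drop_append_of_le_length (by simp [hlt.le])]
        simp [List.drop_of_length_le]
      have htail : (List.range m).reverse.map
            (fun j => c + ls[m] + ((ls.take m).drop j).sum)
          = (List.range m).reverse.map
            (fun j => c + ((ls.take m ++ [ls[m]]).drop j).sum) := by
        apply List.map_congr_left
        intro j hj
        have hjm : j < m := by
          have := List.mem_range.mp (List.mem_reverse.mp hj)
          exact this
        rw [List.drop_append_of_le_length (by simp [List.length_take_of_le hlt.le, hjm.le])]
        simp [List.sum_append]
        ring
      rw [hhead, htail]
      simp
    · rw [htake, List.sum_append, List.sum_cons, List.sum_nil]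
      ring

-- A's pre-sort list is the reverse of B's pre-sort list
theorem pv_lists_rev (ls : List Int) :
    ((PySem.List.pyRange ((ls.length : Int) - 1) (-1) (-1)).foldl
      (fun (st : List Int × Int) i =>
        let cc := st.2 + PySem.List.pyGetD ls i 0
        (st.1 ++ [cc], cc)) ([0], 0)).1
    = ((List.range (ls.length + 1)).map (fun j => (ls.drop j).sum)).reverse := by
  rw [pv_foldA ls ls.length le_rfl [0] 0]
  simp only [List.take_length]
  have h0 : (0 : Int) = (ls.drop ls.length).sum := by simp
  rw [List.range_succ, List.map_append, List.reverse_append]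
  simp [← List.map_reverse]

theorem pv_B_list (ls : List Int) :
    (PySem.List.pyRange 0 ((ls.length : Int) + 1) 1).map
      (fun i => (PySem.List.slice ls (some i) none).sum)
    = (List.range (ls.length + 1)).map (fun j => (ls.drop j).sum) := by
  have : ((ls.length : Int) + 1) = ((ls.length + 1 : Nat) : Int) := by push_cast; ring
  rw [this, PySem.List.pyRange_zero_natCast, List.map_map]
  apply List.map_congr_left
  intro j _
  simp [PySem.List.slice_from_natCast]

-- ===== VERDICT (by name: the statement is the Claim_ definition above) =====
theorem sum_of_parts_spec : Claim_equal_sum_of_parts := by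
  intro ls _
  unfold Spec_sum_of_parts sum_of_parts sum_of_parts_alt
  by_cases h : ls = []
  · subst h; decide
  · simp only [h, if_false]
    rw [pv_B_list ls]
    apply pv_sorted_rev_congr
    rw [pv_lists_rev ls]
    exact List.reverse_perm _
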